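-- pv_equiv track=rewrite | github.com/jejacobs23/osteo | Python_Programs/Make_sig_pathways_summary_file_by_VEP-consequences.py | whos_yo_daddy
-- ===== SOURCE A (Python) =====
-- def whos_yo_daddy(G, P):
--     L = []
--     for j in P:
--         for i in G:
--             if j in G[i]:
--                 if i not in L:
--                     L.append(i)
--     return(L)
-- ===== SOURCE B (Python) =====
-- def whos_yo_daddy(G, P):
--     # inverted index: element -> list of keys (in G order) whose value list contains it
--     index = {}
--     for i in G:
--         for e in G[i]:
--             index.setdefault(e, []).append(i)
--     seen = set()
--     out = []
--     for j in P:
--         for i in index.get(j, ()):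
--             if i not in seen:
--                 seen.add(i)
--                 out.append(i)
--     return out
-- ===== Notes on version B (the rewrite author's own statement) =====
-- stated objective: faster
-- what changed: Replaces the nested scan of all dict values for every query element by an inverted index element->keys built once in G order, consumed with a seen-set for O(1) dedup instead of the linear 'i not in L' membership test.
import Mathlib
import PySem

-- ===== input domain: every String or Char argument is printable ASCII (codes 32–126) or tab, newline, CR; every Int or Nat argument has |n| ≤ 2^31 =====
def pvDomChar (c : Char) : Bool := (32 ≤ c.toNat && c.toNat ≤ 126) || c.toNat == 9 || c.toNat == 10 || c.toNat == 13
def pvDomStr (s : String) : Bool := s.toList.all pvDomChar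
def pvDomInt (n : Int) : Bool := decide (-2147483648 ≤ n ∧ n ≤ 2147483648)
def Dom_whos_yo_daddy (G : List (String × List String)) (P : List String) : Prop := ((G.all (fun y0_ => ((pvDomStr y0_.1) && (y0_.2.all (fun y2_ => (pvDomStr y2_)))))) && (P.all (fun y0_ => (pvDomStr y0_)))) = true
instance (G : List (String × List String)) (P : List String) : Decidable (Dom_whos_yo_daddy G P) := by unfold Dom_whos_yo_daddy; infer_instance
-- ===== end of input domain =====

-- B replaces A's per-query scan of all dict values by an inverted index element→keys built once, with a seen-set for dedup (objective: faster).


-- ===== PORT A =====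
-- G is a Python dict: iterate its keys; G[i] is a lookup (i is a key of G, so it always hits — getD's default is never used)
def whos_yo_daddy (G : List (String × List String)) (P : List String) : List String :=
  let d := PySem.Dict.ofList G
  P.foldl (fun L j =>
    d.keys.foldl (fun L i =>
      if j ∈ d.getD i [] then (if i ∈ L then L else L ++ [i]) else L) L) []

-- ===== PORT B =====
def whos_yo_daddy_alt (G : List (String × List String)) (P : List String) : List String :=
  let d := PySem.Dict.ofList G
  let idx := d.items.foldl (fun dd p =>
      p.2.foldl (fun dd e => dd.modify e [] (fun l => l ++ [p.1])) dd)
    (PySem.Dict.empty : PySem.Dict String (List String))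
  (P.foldl (fun st j =>
      (idx.getD j []).foldl
        (fun st i => if PySem.Set.contains st.1 i then st else (PySem.Set.add st.1 i, st.2 ++ [i]))
        st)
    ((PySem.Set.empty : PySem.Set String), ([] : List String))).2

-- ===== PRECONDITION & SPEC =====
def Spec_whos_yo_daddy (G : List (String × List String)) (P : List String) (out : List String) : Prop := out = whos_yo_daddy_alt G P
instance (G : List (String × List String)) (P : List String) (out : List String) : Decidable (Spec_whos_yo_daddy G P out) := by unfold Spec_whos_yo_daddy; infer_instance

-- ===== CLAIM (what is proved, stated in full; the proofs are below) =====
def Claim_equal_whos_yo_daddy : Prop := ∀ (G : List (String × List String)) (P : List String), Dom_whos_yo_daddy G P → Spec_whos_yo_daddy G P (whos_yo_daddy G P)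

-- ===== LEMMAS AND PROOFS =====

-- keys (in items order) whose value list contains j
def pvHits (j : String) (items : List (String × List String)) : List String :=
  (items.filter (fun p => decide (j ∈ p.2))).map Prod.fst

-- the raw inverted-index bucket for j: one copy of p.1 per occurrence of j in p.2
def pvFlat (j : String) (items : List (String × List String)) : List String :=
  items.flatMap (fun p => (p.2.filter (fun e => e == j)).map (fun _ => p.1))

-- the common specification step: append the not-yet-listed hits of j
def pvStep (items : List (String × List String)) (L : List String) (j : String) : List String :=
  L ++ (pvHits j items).filter (fun i => decide (i ∉ L))

-- B's index-building loop: its bucket for j is exactly pvFlat j items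
lemma idx_getD (j : String) :
    ∀ (items : List (String × List String)) (dd : PySem.Dict String (List String)),
    (items.foldl (fun dd p =>
        p.2.foldl (fun dd e => dd.modify e [] (fun l => l ++ [p.1])) dd) dd).getD j []
      = dd.getD j [] ++ pvFlat j items := by
  intro items
  induction items with
  | nil => intro dd; simp [pvFlat]
  | cons p rest ih =>
    intro dd
    simp only [List.foldl_cons, ih]
    have h1 : p.2.foldl (fun dd e => dd.modify e [] (fun l => l ++ [p.1])) dd
        = (p.2.map (fun e => (e, p.1))).foldl (fun dd q => dd.modify q.1 [] (fun l => l ++ [q.2])) dd := by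
      rw [List.foldl_map]
    rw [h1, PySem.Dict.getD_foldl_modify_append]
    simp [pvFlat, List.filter_map, Function.comp_def]

-- A's inner loop over a nodup-keyed item list is pvStep
lemma lemA (j : String) :
    ∀ (items : List (String × List String)) (L : List String),
    (items.map Prod.fst).Nodup →
    items.foldl (fun L p => if j ∈ p.2 then (if p.1 ∈ L then L else L ++ [p.1]) else L) L
      = pvStep items L j := by
  intro items
  induction items with
  | nil => intro L _; simp [pvStep, pvHits]
  | cons p rest ih =>
    intro L hnd
    simp only [List.map_cons, List.nodup_cons] at hnd
    obtain ⟨hp, hnd⟩ := hnd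
    simp only [List.foldl_cons]
    by_cases hj : j ∈ p.2
    · by_cases hL : p.1 ∈ L
      · rw [if_pos hj, if_pos hL, ih L hnd]
        simp [pvStep, pvHits, hj, hL]
      · rw [if_pos hj, if_neg hL, ih (L ++ [p.1]) hnd]
        simp only [pvStep, pvHits, List.filter_cons, hj, decide_true, if_pos, List.map_cons,
          hL, not_false_eq_true, List.append_assoc, List.singleton_append]
        congr 2
        apply List.filter_congr
        intro x hx
        have hxr : x ∈ rest.map Prod.fst := by
          rcases List.mem_map.mp hx with ⟨q, hq, rfl⟩
          exact List.mem_map.mpr ⟨q, List.mem_of_mem_filter hq, rfl⟩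
        have hne : x ≠ p.1 := fun h => hp (h ▸ hxr)
        simp [hne, List.mem_append]
    · rw [if_neg hj, ih L hnd]
      simp [pvStep, pvHits, hj]

-- set() of a nonempty constant list is the singleton
lemma ofList_const (x : String) : ∀ (l : List String), (∀ y ∈ l, y = x) → l ≠ [] →
    PySem.Set.ofList l = [x] := by
  intro l
  induction l with
  | nil => intro _ h; exact absurd rfl h
  | cons a t ih =>
    intro hc _
    have ha : a = x := hc a (by simp)
    rw [PySem.Set.ofList_cons]
    by_cases ht : t = []
    · subst ht ha; simp [PySem.Set.ofList_nil, PySem.Set.discard]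
    · rw [ih (fun y hy => hc y (by simp [hy])) ht, ha]
      simp [PySem.Set.discard]

-- dedup of the bucket is the hit list (keys are distinct, each occupies its own block)
lemma ofList_flat (j : String) :
    ∀ (items : List (String × List String)), (items.map Prod.fst).Nodup →
    PySem.Set.ofList (pvFlat j items) = pvHits j items := by
  intro items
  induction items with
  | nil => intro _; simp [pvFlat, pvHits, PySem.Set.ofList_nil]
  | cons p rest ih =>
    intro hnd
    simp only [List.map_cons, List.nodup_cons] at hnd
    obtain ⟨hp, hnd⟩ := hnd
    have hfl : pvFlat j (p :: rest)
        = (p.2.filter (fun e => e == j)).map (fun _ => p.1) ++ pvFlat j rest := by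
      simp [pvFlat]
    rw [hfl, PySem.Set.ofList_append]
    by_cases hj : j ∈ p.2
    · have hblk : PySem.Set.ofList ((p.2.filter (fun e => e == j)).map (fun _ => p.1)) = [p.1] := by
        apply ofList_const
        · intro y hy; rcases List.mem_map.mp hy with ⟨_, _, rfl⟩; rfl
        · simp only [ne_eq, List.map_eq_nil_iff, List.filter_eq_nil_iff]
          intro h; exact absurd (h j hj) (by simp)
      rw [hblk, PySem.Set.update_eq_append_filter, ih hnd]
      have : (pvHits j rest).filter (fun y => !(PySem.Set.contains [p.1] y)) = pvHits j rest := by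
        apply List.filter_eq_self.mpr
        intro x hx
        have hxr : x ∈ rest.map Prod.fst := by
          rcases List.mem_map.mp hx with ⟨q, hq, rfl⟩
          exact List.mem_map.mpr ⟨q, List.mem_of_mem_filter hq, rfl⟩
        have hne : x ≠ p.1 := fun h => hp (h ▸ hxr)
        simp [PySem.Set.contains, hne]
      rw [this]
      simp [pvHits, hj]
    · have hblk : (p.2.filter (fun e => e == j)).map (fun _ => p.1) = ([] : List String) := by
        simp only [List.map_eq_nil_iff, List.filter_eq_nil_iff]
        intro e he hej
        exact hj ((by simpa using hej : e = j) ▸ he)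
      rw [hblk]
      have h2 : PySem.Set.update (PySem.Set.ofList ([] : List String)) (pvFlat j rest)
          = PySem.Set.ofList (pvFlat j rest) := by
        simp [PySem.Set.ofList_nil, PySem.Set.update_nil_left]
      rw [h2, ih hnd]
      simp [pvHits, hj]

-- B's seen/out loop over one bucket: it appends the unseen distinct elements; the seen-set tracks out
lemma consume :
    ∀ (xs : List String) (s : PySem.Set String) (out : List String),
    (∀ x, x ∈ s ↔ x ∈ out) →
    (xs.foldl (fun st i => if PySem.Set.contains st.1 i then st
        else (PySem.Set.add st.1 i, st.2 ++ [i])) (s, out)).2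
      = out ++ (PySem.Set.ofList xs).filter (fun i => decide (i ∉ out))
    ∧ ∀ x, x ∈ (xs.foldl (fun st i => if PySem.Set.contains st.1 i then st
        else (PySem.Set.add st.1 i, st.2 ++ [i])) (s, out)).1
        ↔ x ∈ (xs.foldl (fun st i => if PySem.Set.contains st.1 i then st
        else (PySem.Set.add st.1 i, st.2 ++ [i])) (s, out)).2 := by
  intro xs
  induction xs with
  | nil => intro s out hinv; exact ⟨by simp [PySem.Set.ofList_nil], hinv⟩
  | cons a t ih =>
    intro s out hinv
    simp only [List.foldl_cons]
    by_cases ha : a ∈ s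
    · have hc : PySem.Set.contains s a = true := by
        rw [PySem.Set.contains_iff]; exact ha
      rw [if_pos hc]
      obtain ⟨h1, h2⟩ := ih s out hinv
      refine ⟨?_, h2⟩
      rw [h1]
      congr 1
      rw [PySem.Set.ofList_cons]
      have haout : a ∈ out := (hinv a).mp ha
      rw [List.filter_cons_of_neg (by simp [haout])]
      simp only [PySem.Set.discard, List.filter_filter]
      apply (List.filter_congr ?_).symm
      intro x _
      by_cases hx : x = a <;> simp [hx, haout]
    · have hc : ¬ PySem.Set.contains s a = true := by
        rw [PySem.Set.contains_iff]; exact ha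
      rw [if_neg hc]
      have haout : a ∉ out := fun h => ha ((hinv a).mpr h)
      have hinv' : ∀ x, x ∈ PySem.Set.add s a ↔ x ∈ out ++ [a] := by
        intro x
        rw [PySem.Set.mem_add, List.mem_append, hinv x]
        simp [or_comm, eq_comm]
      obtain ⟨h1, h2⟩ := ih (PySem.Set.add s a) (out ++ [a]) hinv'
      refine ⟨?_, h2⟩
      rw [h1, PySem.Set.ofList_cons, List.filter_cons_of_pos (by simp [haout])]
      simp only [List.append_assoc, List.cons_append, List.nil_append]
      congr 2
      simp only [PySem.Set.discard, List.filter_filter]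
      apply List.filter_congr
      intro x _
      by_cases hx : x = a <;> simp [hx, List.mem_append]

-- B's outer loop equals the pvStep fold
lemma lemB (items : List (String × List String)) (idx : PySem.Dict String (List String))
    (hidx : ∀ j, idx.getD j [] = pvFlat j items)
    (hnd : (items.map Prod.fst).Nodup) :
    ∀ (Q : List String) (s : PySem.Set String) (out : List String),
    (∀ x, x ∈ s ↔ x ∈ out) →
    (Q.foldl (fun st j => (idx.getD j []).foldl
        (fun st i => if PySem.Set.contains st.1 i then st
          else (PySem.Set.add st.1 i, st.2 ++ [i])) st) (s, out)).2
      = Q.foldl (fun L j => pvStep items L j) out := by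
  intro Q
  induction Q with
  | nil => intro s out _; rfl
  | cons j Q ih =>
    intro s out hinv
    simp only [List.foldl_cons]
    obtain ⟨h1, h2⟩ := consume (idx.getD j []) s out hinv
    have hr : ((idx.getD j []).foldl
        (fun st i => if PySem.Set.contains st.1 i then st
          else (PySem.Set.add st.1 i, st.2 ++ [i])) (s, out))
        = (((idx.getD j []).foldl (fun st i => if PySem.Set.contains st.1 i then st
          else (PySem.Set.add st.1 i, st.2 ++ [i])) (s, out)).1,
           ((idx.getD j []).foldl (fun st i => if PySem.Set.contains st.1 i then st
          else (PySem.Set.add st.1 i, st.2 ++ [i])) (s, out)).2) := rfl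
    rw [hr, ih _ _ h2, h1]
    have : out ++ (PySem.Set.ofList (idx.getD j [])).filter (fun i => decide (i ∉ out))
        = pvStep items out j := by
      rw [hidx j, ofList_flat j items hnd]; rfl
    rw [this]

-- ===== VERDICT (by name: the statement is the Claim_ definition above) =====
theorem whos_yo_daddy_spec : Claim_equal_whos_yo_daddy := by
  intro G P _
  unfold Spec_whos_yo_daddy whos_yo_daddy whos_yo_daddy_alt
  simp only []
  set d := PySem.Dict.ofList G with hd
  have hk : d.keys.Nodup := PySem.Dict.nodup_keys_ofList G
  have hndf : (d.items.map Prod.fst).Nodup := hk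
  -- A side
  have hA : ∀ (L : List String) (j : String),
      d.keys.foldl (fun L i => if j ∈ d.getD i [] then (if i ∈ L then L else L ++ [i]) else L) L
        = pvStep d.items L j := by
    intro L j
    rw [← lemA j d.items L hndf, PySem.Dict.items_eq_map_keys d hk [], List.foldl_map]
  have hAeq : (fun L j => d.keys.foldl
      (fun L i => if j ∈ d.getD i [] then (if i ∈ L then L else L ++ [i]) else L) L)
      = fun L j => pvStep d.items L j := funext fun L => funext fun j => hA L j
  rw [hAeq]
  -- B side
  set idx := d.items.foldl (fun dd p =>
      p.2.foldl (fun dd e => dd.modify e [] (fun l => l ++ [p.1])) dd)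
    (PySem.Dict.empty : PySem.Dict String (List String)) with hidxdef
  have hidx : ∀ j, idx.getD j [] = pvFlat j d.items := by
    intro j
    rw [hidxdef, idx_getD j d.items PySem.Dict.empty, PySem.Dict.getD_empty, List.nil_append]
  rw [lemB d.items idx hidx hndf P PySem.Set.empty [] (by simp [PySem.Set.empty])]
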